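-- pv_equiv track=rewrite | github.com/SoyeonHH/Algorithm_Python | LeetCode/316.py | removeDuplicateLetters_2
-- ===== SOURCE A (Python) =====
-- import collections
--
-- def removeDuplicateLetters_2(s: str) -> str:
--     counter, seen, stack = collections.Counter(s), set(), []
--
--     for char in s:
--         counter[char] -= 1
--         if char in seen:
--             continue
--         # 뒤에 붙일 문자가 남아 있다면 스택에서 제거
--         while stack and char < stack[-1] and counter[stack[-1]] > 0:
--             seen.remove(stack.pop())
--         stack.append(char)
--         seen.add(char)
--
--     return ''.join(stack)
-- ===== SOURCE B (Python) =====
-- def removeDuplicateLetters_2(s: str) -> str: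
--     # Recursive suffix selection: pick the smallest char reachable before any
--     # needed char runs out, emit it, recurse on the remainder without it.
--     if not s:
--         return ''
--     counter = {}
--     for c in s:
--         counter[c] = counter.get(c, 0) + 1
--     best, pos = s[0], 0
--     for i, c in enumerate(s):
--         if c < best:
--             best, pos = c, i
--         counter[c] -= 1
--         if counter[c] == 0:
--             break
--     return best + removeDuplicateLetters_2(s[pos + 1:].replace(best, ''))
-- ===== Notes on version B (the rewrite author's own statement) =====
-- stated objective: alternative
-- what changed: Replaced the monotonic-stack greedy (counter + seen set + pop loop) by the recursive suffix-selection algorithm: scan for the smallest character reachable before any character's remaining count hits zero, emit it, and recurse on the suffix with that character removed.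
import Mathlib
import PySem

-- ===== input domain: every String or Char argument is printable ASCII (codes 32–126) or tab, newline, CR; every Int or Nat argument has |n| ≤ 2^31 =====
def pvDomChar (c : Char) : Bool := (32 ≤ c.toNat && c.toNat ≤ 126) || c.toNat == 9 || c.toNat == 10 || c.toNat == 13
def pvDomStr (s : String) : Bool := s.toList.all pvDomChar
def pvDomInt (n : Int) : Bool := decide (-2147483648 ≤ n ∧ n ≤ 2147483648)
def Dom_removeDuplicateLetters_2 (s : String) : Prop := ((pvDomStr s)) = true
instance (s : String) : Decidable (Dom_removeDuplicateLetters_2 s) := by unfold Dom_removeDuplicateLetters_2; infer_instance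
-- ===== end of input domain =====

-- B replaces the monotonic-stack greedy by the recursive smallest-reachable-character selection; alternative algorithm, not claimed faster.


-- ===== PORT A =====
-- the while loop: 'while stack and char < stack[-1] and counter[stack[-1]] > 0: seen.remove(stack.pop())'
-- (Python's seen.remove is ported as Set.discard: the popped element is always a member of seen, so they agree)
def popA (counter : PySem.Dict Char Int) (ch : Char) (stack : List Char) (seen : PySem.Set Char) :
    List Char × PySem.Set Char :=
  match h : stack.getLast? with
  | none => (stack, seen)
  | some top =>
    if ch < top ∧ counter.getD top 0 > 0 then
      popA counter ch stack.dropLast (PySem.Set.discard seen top)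
    else (stack, seen)
termination_by stack.length
decreasing_by
  have hne : stack ≠ [] := by intro hs; rw [hs] at h; simp at h
  have : 0 < stack.length := List.length_pos_iff.mpr hne
  simp [List.length_dropLast]; omega

-- the body of 'for char in s'
def stepA (st : PySem.Dict Char Int × PySem.Set Char × List Char) (char : Char) :
    PySem.Dict Char Int × PySem.Set Char × List Char :=
  let counter := st.1.modify char 0 (· - 1)        -- counter[char] -= 1 (Counter: missing key reads as 0)
  if PySem.Set.contains st.2.1 char then (counter, st.2.1, st.2.2)   -- if char in seen: continue
  else
    let pr := popA counter char st.2.2 st.2.1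
    (counter, PySem.Set.add pr.2 char, pr.1 ++ [char])   -- stack.append(char); seen.add(char)

def removeDuplicateLetters_2 (s : String) : String :=
  String.mk (s.toList.foldl stepA (PySem.Dict.counter s.toList, PySem.Set.empty, ([] : List Char))).2.2

-- ===== PORT B =====
-- 'counter[c] = counter.get(c, 0) + 1' loop
def bCount (s : List Char) : PySem.Dict Char Int :=
  s.foldl (fun d c => d.insert c (d.getD c 0 + 1)) PySem.Dict.empty

-- 'for i, c in enumerate(s): …' with the break; returns (best, pos)
def bLoop (counter : PySem.Dict Char Int) (l : List Char) (i : Nat) (best : Char) (pos : Nat) :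
    Char × Nat :=
  match l with
  | [] => (best, pos)
  | c :: rest =>
    let bp := if c < best then (c, i) else (best, pos)
    let counter' := counter.modify c 0 (· - 1)
    if counter'.getD c 0 = 0 then bp
    else bLoop counter' rest (i + 1) bp.1 bp.2

-- the recursion; s[pos+1:].replace(best, '') is ported as drop (pos+1) then filter (removing a
-- single character via str.replace with '' removes exactly all its occurrences — exact here)
def altGo (s : List Char) : List Char :=
  match s with
  | [] => []
  | c0 :: rest =>
    let bp := bLoop (bCount (c0 :: rest)) (c0 :: rest) 0 c0 0
    bp.1 :: altGo (((c0 :: rest).drop (bp.2 + 1)).filter (fun c => c ≠ bp.1))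
termination_by s.length
decreasing_by
  have h1 := List.length_filter_le
    (fun c => decide (c ≠ (bLoop (bCount (c0 :: rest)) (c0 :: rest) 0 c0 0).1))
    ((c0 :: rest).drop ((bLoop (bCount (c0 :: rest)) (c0 :: rest) 0 c0 0).2 + 1))
  have h2 : ((c0 :: rest).drop ((bLoop (bCount (c0 :: rest)) (c0 :: rest) 0 c0 0).2 + 1)).length
      = (c0 :: rest).length - ((bLoop (bCount (c0 :: rest)) (c0 :: rest) 0 c0 0).2 + 1) :=
    List.length_drop ..
  simp only [List.length_cons] at *
  omega

def removeDuplicateLetters_2_alt (s : String) : String :=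
  String.mk (altGo s.toList)

-- ===== PRECONDITION & SPEC =====
def Spec_removeDuplicateLetters_2 (s : String) (out : String) : Prop := out = removeDuplicateLetters_2_alt s
instance (s : String) (out : String) : Decidable (Spec_removeDuplicateLetters_2 s out) := by unfold Spec_removeDuplicateLetters_2; infer_instance

-- ===== CLAIM (what is proved, stated in full; the proofs are below) =====
def Claim_equal_removeDuplicateLetters_2 : Prop := ∀ (s : String), Dom_removeDuplicateLetters_2 s → Spec_removeDuplicateLetters_2 s (removeDuplicateLetters_2 s)

-- ===== LEMMAS AND PROOFS =====

-- Clean model of A's pop loop: stack with TOP FIRST, the counter replaced by membership in the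
-- remaining suffix t (counter[d] > 0 there ⟺ d occurs in t).
def pops (c : Char) (t : List Char) : List Char → List Char
  | [] => []
  | d :: st => if c < d ∧ d ∈ t then pops c t st else d :: st

-- Clean model of A's whole loop: stack top-first, seen = set of stack elements.
def runA (t : List Char) (st : List Char) : List Char :=
  match t with
  | [] => st
  | c :: t' => if c ∈ st then runA t' st else runA t' (c :: pops c t' st)

-- Clean model of B's scan (break test 'counter[c] == 0' ⟺ c ∉ rest).
def scanB (t : List Char) (best : Char) (pos k : Nat) : Char × Nat :=
  match t with
  | [] => (best, pos)
  | c :: rest =>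
    let bp := if c < best then (c, k) else (best, pos)
    if c ∈ rest then scanB rest bp.1 bp.2 (k + 1) else bp

-- ---- pops facts ----
lemma pops_sublist (c : Char) (t : List Char) : ∀ st : List Char, (pops c t st).Sublist st := by
  intro st; induction st with
  | nil => simp [pops]
  | cons d st ih =>
    simp only [pops]; split
    · exact ih.trans (List.sublist_cons_self d st)
    · exact List.Sublist.refl _

lemma pops_all (c : Char) (t : List Char) :
    ∀ st : List Char, (∀ d ∈ st, c < d ∧ d ∈ t) → pops c t st = [] := by
  intro st h; induction st with
  | nil => rfl
  | cons d st ih =>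
    simp only [pops]
    rw [if_pos (h d (List.mem_cons_self))]
    exact ih fun e he => h e (List.mem_cons_of_mem _ he)

lemma pops_keep (c : Char) (t : List Char) :
    ∀ st : List Char, ∀ z ∈ st, z ∉ t → z ∈ pops c t st := by
  intro st; induction st with
  | nil => simp
  | cons d st ih =>
    intro z hz hzt
    simp only [pops]; split
    · rename_i hcond
      rcases List.mem_cons.mp hz with h | h
      · exact absurd (h ▸ hcond.2) hzt
      · exact ih z h hzt
    · exact hz

lemma pops_id (c : Char) (t : List Char) (r : List Char) (hr : ∀ m ∈ r, ¬(c < m ∧ m ∈ t)) :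
    pops c t r = r := by
  cases r with
  | nil => rfl
  | cons d r' => simp only [pops]; rw [if_neg (hr d List.mem_cons_self)]

lemma pops_stop (c : Char) (t : List Char) :
    ∀ (st r : List Char), ((∃ z ∈ st, ¬(c < z ∧ z ∈ t)) ∨ (∀ m ∈ r, ¬(c < m ∧ m ∈ t))) →
      pops c t (st ++ r) = pops c t st ++ r := by
  intro st
  induction st with
  | nil =>
    intro r h
    rcases h with ⟨z, hz, _⟩ | h
    · simp at hz
    · simpa [pops] using pops_id c t r h
  | cons d st ih =>
    intro r h
    by_cases hd : c < d ∧ d ∈ t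
    · simp only [List.cons_append, pops, if_pos hd]
      refine ih r ?_
      rcases h with ⟨z, hz, hzc⟩ | h
      · rcases List.mem_cons.mp hz with rfl | hz
        · exact absurd hd hzc
        · exact Or.inl ⟨z, hz, hzc⟩
      · exact Or.inr h
    · simp only [List.cons_append, pops, if_neg hd]

lemma pops_congr (c : Char) (t t₂ : List Char) :
    ∀ st : List Char, (∀ d ∈ st, (d ∈ t ↔ d ∈ t₂)) → pops c t st = pops c t₂ st := by
  intro st
  induction st with
  | nil => intro _; rfl
  | cons d st ih =>
    intro h
    have hd := h d List.mem_cons_self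
    simp only [pops]
    by_cases hc : c < d ∧ d ∈ t
    · rw [if_pos hc, if_pos ⟨hc.1, hd.mp hc.2⟩]
      exact ih fun e he => h e (List.mem_cons_of_mem _ he)
    · rw [if_neg hc, if_neg (fun hc2 => hc ⟨hc2.1, hd.mpr hc2.2⟩)]

-- ---- RUN1: processing a prefix of strictly-larger, recurring chars then m wipes the stack ----
lemma run1 (m : Char) (t : List Char) :
    ∀ (p st : List Char), (∀ c ∈ st, m < c) → (∀ c ∈ st, c ∈ p ++ m :: t) →
      (∀ j < p.length, ∀ c, p[j]? = some c → m < c ∧ c ∈ p.drop (j + 1) ++ m :: t) →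
      runA (p ++ m :: t) st = runA t [m] := by
  intro p
  induction p with
  | nil =>
    intro st h1 h2 _
    have hm : m ∉ st := fun h => lt_irrefl m (h1 m h)
    simp only [List.nil_append, runA, if_neg hm]
    rw [pops_all m t st (fun d hd => ⟨h1 d hd, by
      have := h2 d hd
      simp only [List.nil_append, List.mem_cons] at this
      rcases this with rfl | h
      · exact absurd (h1 d hd) (lt_irrefl d)
      · exact h⟩)]
  | cons a p' ih =>
    intro st h1 h2 h3
    have h0 := h3 0 (by simp) a (by simp)
    rw [List.drop_succ_cons, List.drop_zero] at h0
    obtain ⟨hma, hat⟩ := h0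
    have h3' : ∀ j < p'.length, ∀ c, p'[j]? = some c →
        m < c ∧ c ∈ p'.drop (j + 1) ++ m :: t := by
      intro j hj c hc
      have := h3 (j + 1) (by simp; omega) c (by simpa using hc)
      rwa [List.drop_succ_cons] at this
    simp only [List.cons_append, runA]
    by_cases hst : a ∈ st
    · rw [if_pos hst]
      refine ih st h1 (fun c hc => ?_) h3'
      rcases List.mem_cons.mp (h2 c hc) with rfl | h
      · exact hat
      · exact h
    · rw [if_neg hst]
      refine ih (a :: pops a (p' ++ m :: t) st) (fun c hc => ?_) (fun c hc => ?_) h3'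
      · rcases List.mem_cons.mp hc with rfl | h
        · exact hma
        · exact h1 c ((pops_sublist ..).subset h)
      · rcases List.mem_cons.mp hc with rfl | h
        · exact hat
        · have hcst := (pops_sublist ..).subset h
          rcases List.mem_cons.mp (h2 c hcst) with rfl | h'
          · exact absurd hcst hst
          · exact h'

-- the invariant keeping m at the bottom of the stack
def Jinv (m : Char) (st t : List Char) : Prop :=
  (∀ c ∈ t, m ≤ c) ∨ (∃ z, (z ∈ st ∨ z = m) ∧ z ∉ t) ∨
    (∃ k, (∃ c, t[k]? = some c ∧ c ∉ t.drop (k + 1)) ∧ ∀ j ≤ k, ∀ c, t[j]? = some c → m ≤ c)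

-- ---- RUN2: with Jinv, m stays at the bottom and the rest runs on the m-filtered suffix ----
lemma Jinv_tail (m c : Char) (st st' t' : List Char) (h : Jinv m st (c :: t'))
    (hsub : ∀ z, z ∈ st → z ∉ t' → z ∈ st') (hc : c ∉ t' → c ∈ st' ∨ c = m) :
    Jinv m st' t' := by
  rcases h with h1 | ⟨z, hz, hzt⟩ | ⟨k, ⟨cc, hk, hnd⟩, hall⟩
  · exact Or.inl fun x hx => h1 x (List.mem_cons_of_mem _ hx)
  · have hzt' : z ∉ t' := fun hh => hzt (List.mem_cons_of_mem _ hh)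
    rcases hz with hz | rfl
    · exact Or.inr (Or.inl ⟨z, Or.inl (hsub z hz hzt'), hzt'⟩)
    · exact Or.inr (Or.inl ⟨z, Or.inr rfl, hzt'⟩)
  · cases k with
    | zero =>
      have hcc : cc = c := by simpa using hk.symm
      subst hcc
      have hnt : cc ∉ t' := by simpa using hnd
      rcases hc hnt with h' | h'
      · exact Or.inr (Or.inl ⟨cc, Or.inl h', hnt⟩)
      · exact Or.inr (Or.inl ⟨cc, Or.inr h', hnt⟩)
    | succ k' =>
      refine Or.inr (Or.inr ⟨k', ⟨cc, ?_, ?_⟩, ?_⟩)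
      · simpa using hk
      · simpa [Nat.add_assoc] using hnd
      · intro j hj cj hcj
        exact hall (j + 1) (by omega) cj (by simpa using hcj)

lemma run2 (m : Char) :
    ∀ (t st : List Char), m ∉ st → Jinv m st t →
      runA t (st ++ [m]) = runA (t.filter (fun c => c ≠ m)) st ++ [m] := by
  intro t
  induction t with
  | nil => intro st _ _; simp [runA]
  | cons c t' ih =>
    intro st hm hJ
    by_cases hcm : c = m
    · subst hcm
      simp only [runA, List.filter_cons]
      rw [if_pos (List.mem_append_right st List.mem_cons_self)]
      simp only [ne_eq, not_true_eq_false, decide_false]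
      exact ih st hm (Jinv_tail c c st st t' hJ (fun z hz _ => hz) (fun _ => Or.inr rfl))
    · by_cases hst : c ∈ st
      · simp only [runA, List.filter_cons]
        rw [if_pos (List.mem_append_left _ hst)]
        have hdec : decide (c ≠ m) = true := by simp [hcm]
        rw [if_pos hdec]
        simp only [runA, if_pos hst]
        exact ih st hm (Jinv_tail m c st st t' hJ (fun z hz _ => hz) (fun _ => Or.inl hst))
      · have hnotin : c ∉ st ++ [m] := by
          simp only [List.mem_append, List.mem_singleton]
          rintro (h | h)
          · exact hst h
          · exact hcm h
        have hstop : pops c t' (st ++ [m]) = pops c t' st ++ [m] := by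
          refine pops_stop c t' st [m] ?_
          rcases hJ with h1 | ⟨z, hz | rfl, hzt⟩ | ⟨k, ⟨cc, hk, hnd⟩, hall⟩
          · refine Or.inr (fun m' hm' => ?_)
            rcases List.mem_singleton.mp hm' with rfl
            exact fun hh => absurd hh.1 (not_lt.mpr (h1 c List.mem_cons_self))
          · exact Or.inl ⟨z, hz, fun hh => hzt (List.mem_cons_of_mem _ hh.2)⟩
          · refine Or.inr (fun m' hm' => ?_)
            rcases List.mem_singleton.mp hm' with rfl
            exact fun hh => hzt (List.mem_cons_of_mem _ hh.2)
          · refine Or.inr (fun m' hm' => ?_)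
            rcases List.mem_singleton.mp hm' with rfl
            exact fun hh => absurd hh.1 (not_lt.mpr (hall 0 (Nat.zero_le _) c (by simp)))
        have hJ' : Jinv m (c :: pops c t' st) t' :=
          Jinv_tail m c st _ t' hJ
            (fun z hz hzt => List.mem_cons_of_mem _ (pops_keep c t' st z hz hzt))
            (fun _ => Or.inl List.mem_cons_self)
        have hm' : m ∉ c :: pops c t' st := by
          intro hh
          rcases List.mem_cons.mp hh with rfl | hh2
          · exact hcm rfl
          · exact hm ((pops_sublist ..).subset hh2)
        have hcongr : pops c t' st = pops c (t'.filter (fun x => x ≠ m)) st := by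
          refine pops_congr c t' _ st (fun d hd => ?_)
          have hdm : d ≠ m := fun he => hm (he ▸ hd)
          simp [List.mem_filter, hdm]
        simp only [runA, List.filter_cons]
        rw [if_neg hnotin]
        have hdec : decide (c ≠ m) = true := by simp [hcm]
        rw [if_pos hdec]
        simp only [runA, if_neg hst]
        rw [hstop, ← List.cons_append, ih _ hm' hJ', hcongr]

-- ---- scan characterisation ----
lemma scan_spec (t : List Char) :
    ∀ (p : List Char) (best : Char) (pos : Nat),
      pos < p.length → p[pos]? = some best →
      (∀ j < pos, ∀ c, p[j]? = some c → best < c) →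
      (∀ j < p.length, ∀ c, p[j]? = some c → best ≤ c) →
      (∀ j < p.length, ∀ c, p[j]? = some c → c ∈ (p ++ t).drop (j + 1)) →
      ∃ K, (scanB t best pos p.length).2 ≤ K ∧ K < (p ++ t).length ∧
        (p ++ t)[(scanB t best pos p.length).2]? = some (scanB t best pos p.length).1 ∧
        (∀ j < (scanB t best pos p.length).2, ∀ c, (p ++ t)[j]? = some c → (scanB t best pos p.length).1 < c) ∧
        (∀ j ≤ K, ∀ c, (p ++ t)[j]? = some c → (scanB t best pos p.length).1 ≤ c) ∧
        (∀ j < K, ∀ c, (p ++ t)[j]? = some c → c ∈ (p ++ t).drop (j + 1)) ∧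
        (∀ c, (p ++ t)[K]? = some c → c ∉ (p ++ t).drop (K + 1)) := by
  induction t with
  | nil =>
    intro p best pos h1 h2 h3 h4 h5
    exfalso
    have hj : p.length - 1 < p.length := by omega
    have hx := List.getElem?_eq_getElem hj
    have hmem := h5 (p.length - 1) hj _ hx
    rw [List.append_nil] at hmem
    have he : p.length - 1 + 1 = p.length := by omega
    rw [he, List.drop_length] at hmem
    exact List.not_mem_nil hmem
  | cons c rest ih =>
    intro p best pos h1 h2 h3 h4 h5
    have hassoc : (p ++ [c]) ++ rest = p ++ c :: rest := by simp
    have hlenpc : (p ++ [c]).length = p.length + 1 := by simp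
    obtain ⟨best', pos', hbp, hb1, hb2, hb3, hb4⟩ : ∃ best' pos',
        (if c < best then ((c : Char), p.length) else (best, pos)) = (best', pos') ∧
        pos' < (p ++ [c]).length ∧ (p ++ [c])[pos']? = some best' ∧
        (∀ j < pos', ∀ cc, (p ++ [c])[j]? = some cc → best' < cc) ∧
        (∀ j < (p ++ [c]).length, ∀ cc, (p ++ [c])[j]? = some cc → best' ≤ cc) := by
      by_cases hlt : c < best
      · refine ⟨c, p.length, if_pos hlt, by simp, by simp, ?_, ?_⟩
        · intro j hj cc hcc
          rw [List.getElem?_append_left hj] at hcc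
          exact lt_of_lt_of_le hlt (h4 j hj cc hcc)
        · intro j hj cc hcc
          by_cases hjp : j < p.length
          · rw [List.getElem?_append_left hjp] at hcc
            exact le_of_lt (lt_of_lt_of_le hlt (h4 j hjp cc hcc))
          · have hje : j = p.length := by rw [hlenpc] at hj; omega
            subst hje
            rw [List.getElem?_append_right (le_refl _)] at hcc
            simp at hcc
            exact le_of_eq hcc
      · have hbe : best ≤ c := not_lt.mp hlt
        refine ⟨best, pos, if_neg hlt, by rw [hlenpc]; omega, ?_, ?_, ?_⟩
        · rw [List.getElem?_append_left h1]; exact h2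
        · intro j hj cc hcc
          rw [List.getElem?_append_left (lt_trans hj h1)] at hcc
          exact h3 j hj cc hcc
        · intro j hj cc hcc
          by_cases hjp : j < p.length
          · rw [List.getElem?_append_left hjp] at hcc
            exact h4 j hjp cc hcc
          · have hje : j = p.length := by rw [hlenpc] at hj; omega
            subst hje
            rw [List.getElem?_append_right (le_refl _)] at hcc
            simp at hcc
            exact hcc ▸ hbe
    simp only [scanB]
    by_cases hmem : c ∈ rest
    · rw [if_pos hmem, hbp]
      have h5' : ∀ j < (p ++ [c]).length, ∀ cc, (p ++ [c])[j]? = some cc →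
          cc ∈ ((p ++ [c]) ++ rest).drop (j + 1) := by
        rw [hassoc]
        intro j hj cc hcc
        rw [hlenpc] at hj
        by_cases hjp : j < p.length
        · rw [List.getElem?_append_left hjp] at hcc
          exact h5 j hjp cc hcc
        · have hje : j = p.length := by omega
          subst hje
          rw [List.getElem?_append_right (le_refl _)] at hcc
          simp at hcc
          subst hcc
          have hdrop : (p ++ c :: rest).drop (p.length + 1) = rest := by
            rw [← hassoc, ← hlenpc, List.drop_left]
          rw [hdrop]
          exact hmem
      have := ih (p ++ [c]) best' pos' hb1 hb2 hb3 hb4 h5'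
      rw [hassoc, hlenpc] at this
      exact this
    · rw [if_neg hmem, hbp]
      have hKget : (p ++ c :: rest)[p.length]? = some c := by
        rw [List.getElem?_append_right (le_refl _)]
        simp
      have hdrop : (p ++ c :: rest).drop (p.length + 1) = rest := by
        rw [← hassoc, ← hlenpc, List.drop_left]
      refine ⟨p.length, by rw [hlenpc] at hb1; omega, by simp, ?_, ?_, ?_, ?_, ?_⟩
      · rw [← hassoc, List.getElem?_append_left hb1]
        exact hb2
      · intro j hj cc hcc
        rw [← hassoc, List.getElem?_append_left (lt_trans hj hb1)] at hcc
        exact hb3 j hj cc hcc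
      · intro j hj cc hcc
        have hj' : j < (p ++ [c]).length := by rw [hlenpc]; omega
        rw [← hassoc, List.getElem?_append_left hj'] at hcc
        exact hb4 j hj' cc hcc
      · intro j hj cc hcc
        have hj1 : j < (p ++ [c]).length := by rw [hlenpc]; omega
        rw [← hassoc, List.getElem?_append_left hj1, List.getElem?_append_left hj] at hcc
        exact h5 j hj cc hcc
      · intro cc hcc
        rw [hKget] at hcc
        cases hcc
        rw [hdrop]
        exact hmem

-- ---- bridges from the ports to the models ----
lemma popA_nil (counter : PySem.Dict Char Int) (c : Char) (seen : PySem.Set Char) :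
    popA counter c [] seen = ([], seen) := by
  rw [popA]
  split
  · rfl
  · rename_i top heq
    simp at heq

lemma popA_concat (counter : PySem.Dict Char Int) (c : Char) (l : List Char) (d : Char)
    (seen : PySem.Set Char) :
    popA counter c (l ++ [d]) seen =
      if c < d ∧ counter.getD d 0 > 0 then popA counter c l (PySem.Set.discard seen d)
      else (l ++ [d], seen) := by
  rw [popA]
  split
  · rename_i heq
    rw [List.getLast?_concat] at heq
    cases heq
  · rename_i top heq
    rw [List.getLast?_concat] at heq
    cases heq
    rw [List.dropLast_concat]

lemma popA_eq (c : Char) (t : List Char) (counter : PySem.Dict Char Int)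
    (hc : ∀ x : Char, counter.getD x 0 = (t.count x : Int)) :
    ∀ (stm : List Char) (seen : PySem.Set Char), (∀ x, x ∈ seen ↔ x ∈ stm) → stm.Nodup →
      (popA counter c stm.reverse seen).1 = (pops c t stm).reverse ∧
        (∀ x, x ∈ (popA counter c stm.reverse seen).2 ↔ x ∈ pops c t stm) := by
  intro stm
  induction stm with
  | nil =>
    intro seen hs _
    simp only [List.reverse_nil, popA_nil, pops]
    exact ⟨trivial, hs⟩
  | cons d st' ih =>
    intro seen hs hnd
    have hcnt : (counter.getD d 0 > 0) ↔ d ∈ t := by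
      rw [hc d]
      exact_mod_cast List.count_pos_iff
    have hnd' : st'.Nodup := (List.nodup_cons.mp hnd).2
    have hdnot : d ∉ st' := (List.nodup_cons.mp hnd).1
    simp only [List.reverse_cons, popA_concat]
    by_cases hcd : c < d ∧ d ∈ t
    · rw [if_pos ⟨hcd.1, hcnt.mpr hcd.2⟩]
      have hs' : ∀ x, x ∈ PySem.Set.discard seen d ↔ x ∈ st' := by
        intro x
        rw [PySem.Set.mem_discard]
        constructor
        · rintro ⟨hx, hne⟩
          rcases List.mem_cons.mp ((hs x).mp hx) with rfl | h
          · exact absurd rfl hne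
          · exact h
        · intro hx
          exact ⟨(hs x).mpr (List.mem_cons_of_mem _ hx), fun he => hdnot (he ▸ hx)⟩
      have := ih (PySem.Set.discard seen d) hs' hnd'
      simpa only [pops, if_pos hcd] using this
    · rw [if_neg (fun h2 => hcd ⟨h2.1, hcnt.mp h2.2⟩)]
      simp only [pops, if_neg hcd, List.reverse_cons]
      exact ⟨trivial, hs⟩

lemma foldA (t : List Char) :
    ∀ (counter : PySem.Dict Char Int) (seen : PySem.Set Char) (stm : List Char),
      (∀ x : Char, counter.getD x 0 = (t.count x : Int)) →
      (∀ x, x ∈ seen ↔ x ∈ stm) → stm.Nodup →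
      (t.foldl stepA (counter, seen, stm.reverse)).2.2 = (runA t stm).reverse := by
  induction t with
  | nil => intro counter seen stm _ _ _; rfl
  | cons c t' ih =>
    intro counter seen stm hcnt hs hnd
    have hcnt' : ∀ x : Char, (counter.modify c 0 (· - 1)).getD x 0 = (t'.count x : Int) := by
      intro x
      rw [PySem.Dict.getD_modify]
      split
      · rename_i hx
        subst hx
        rw [hcnt x, List.count_cons_self]
        push_cast; ring
      · rename_i hx
        rw [hcnt x, List.count_cons_of_ne (fun h => hx h.symm)]
    simp only [List.foldl_cons, stepA]
    by_cases hmem : c ∈ stm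
    · have hb : PySem.Set.contains seen c = true := (PySem.Set.contains_iff _ _).mpr ((hs c).mpr hmem)
      rw [if_pos hb]
      rw [runA, if_pos hmem]
      exact ih _ _ _ hcnt' hs hnd
    · have hb : ¬ (PySem.Set.contains seen c = true) := by
        intro h
        exact hmem ((hs c).mp ((PySem.Set.contains_iff _ _).mp h))
      rw [if_neg hb]
      obtain ⟨h1, h2⟩ := popA_eq c t' (counter.modify c 0 (· - 1)) hcnt' stm seen hs hnd
      rw [runA, if_neg hmem]
      have hpsub := (pops_sublist c t' stm).subset
      have hnodup2 : (c :: pops c t' stm).Nodup :=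
        List.nodup_cons.mpr ⟨fun h => hmem (hpsub h), hnd.sublist (pops_sublist c t' stm)⟩
      have hs2 : ∀ x, x ∈ PySem.Set.add (popA (counter.modify c 0 (· - 1)) c stm.reverse seen).2 c
          ↔ x ∈ c :: pops c t' stm := by
        intro x
        rw [PySem.Set.mem_add, List.mem_cons, h2 x]
        tauto
      have := ih (counter.modify c 0 (· - 1))
        (PySem.Set.add (popA (counter.modify c 0 (· - 1)) c stm.reverse seen).2 c)
        (c :: pops c t' stm) hcnt' hs2 hnodup2
      rw [← this, h1]
      simp [List.reverse_cons]

lemma bLoop_eq_scanB (l : List Char) :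
    ∀ (counter : PySem.Dict Char Int) (k : Nat) (best : Char) (pos : Nat),
      (∀ x : Char, counter.getD x 0 = (l.count x : Int)) →
      bLoop counter l k best pos = scanB l best pos k := by
  induction l with
  | nil => intro counter k best pos _; rfl
  | cons c rest ih =>
    intro counter k best pos hcnt
    have hcnt' : ∀ x : Char, (counter.modify c 0 (· - 1)).getD x 0 = (rest.count x : Int) := by
      intro x
      rw [PySem.Dict.getD_modify]
      split
      · rename_i hx
        subst hx
        rw [hcnt x, List.count_cons_self]
        push_cast; ring
      · rename_i hx
        rw [hcnt x, List.count_cons_of_ne (fun h => hx h.symm)]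
    have hzero : ((counter.modify c 0 (· - 1)).getD c 0 = 0) ↔ ¬ (c ∈ rest) := by
      rw [hcnt' c]
      rw [← List.count_eq_zero]
      exact_mod_cast Int.natCast_eq_zero
    simp only [bLoop, scanB]
    by_cases hmem : c ∈ rest
    · rw [if_neg (fun h => (hzero.mp h) hmem), if_pos hmem]
      exact ih _ _ _ _ hcnt'
    · rw [if_pos (hzero.mpr hmem), if_neg hmem]

-- ---- main theorem on lists ----
lemma altGo_cons (c0 : Char) (rest : List Char) :
    altGo (c0 :: rest) = (scanB (c0 :: rest) c0 0 0).1 ::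
      altGo (((c0 :: rest).drop ((scanB (c0 :: rest) c0 0 0).2 + 1)).filter
        (fun c => c ≠ (scanB (c0 :: rest) c0 0 0).1)) := by
  have hcnt : ∀ x : Char, (bCount (c0 :: rest)).getD x 0 = ((c0 :: rest).count x : Int) := by
    intro x
    unfold bCount
    rw [PySem.Dict.getD_foldl_insert_add_one]
    rw [PySem.Dict.getD_empty]
    ring
  rw [altGo, bLoop_eq_scanB (c0 :: rest) (bCount (c0 :: rest)) 0 c0 0 hcnt]

lemma assemble (n : Nat) (ih : ∀ s' : List Char, s'.length ≤ n → (runA s' []).reverse = altGo s')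
    (s : List Char) (hlen : s.length ≤ n + 1) (M : Char) (P K : Nat)
    (hPK : P ≤ K) (hK : K < s.length)
    (hP : s[P]? = some M)
    (hlt : ∀ j < P, ∀ c, s[j]? = some c → M < c)
    (hle : ∀ j ≤ K, ∀ c, s[j]? = some c → M ≤ c)
    (hrec : ∀ j < K, ∀ c, s[j]? = some c → c ∈ s.drop (j + 1))
    (hdie : ∀ c, s[K]? = some c → c ∉ s.drop (K + 1)) :
    (runA s []).reverse = M :: altGo ((s.drop (P + 1)).filter (fun c => c ≠ M)) := by
  have hPs : P < s.length := Nat.lt_of_le_of_lt hPK hK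
  have hM : s[P] = M := by
    have h := List.getElem?_eq_getElem hPs
    rw [hP] at h
    exact (Option.some.injEq ..).mp h.symm
  have hsplit : s = s.take P ++ M :: s.drop (P + 1) := by
    conv_lhs => rw [← List.take_append_drop P s]
    rw [List.drop_eq_getElem_cons hPs, hM]
  have hlen_take : (s.take P).length = P := by
    rw [List.length_take]
    omega
  have h1 : runA s [] = runA (s.drop (P + 1)) [M] := by
    conv_lhs => rw [hsplit]
    refine run1 M (s.drop (P + 1)) (s.take P) [] (by simp) (by simp) ?_
    intro j hj c hc
    rw [hlen_take] at hj
    have hc' : s[j]? = some c := by rwa [List.getElem?_take_of_lt hj] at hc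
    refine ⟨hlt j hj c hc', ?_⟩
    have hd : (s.take P).drop (j + 1) ++ M :: s.drop (P + 1) = s.drop (j + 1) := by
      conv_rhs => rw [hsplit]
      rw [List.drop_append_of_le_length (by rw [hlen_take]; omega)]
    rw [hd]
    exact hrec j (Nat.lt_of_lt_of_le hj hPK) c hc'
  have hJ : Jinv M [] (s.drop (P + 1)) := by
    by_cases hKP : K = P
    · refine Or.inr (Or.inl ⟨M, Or.inr rfl, ?_⟩)
      have := hdie M (hKP ▸ hP)
      rwa [hKP] at this
    · have hPK' : P < K := Nat.lt_of_le_of_ne hPK (fun h => hKP h.symm)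
      have hgK := List.getElem?_eq_getElem hK
      refine Or.inr (Or.inr ⟨K - P - 1, ⟨s[K], ?_, ?_⟩, ?_⟩)
      · rw [List.getElem?_drop]
        have he : P + 1 + (K - P - 1) = K := by omega
        rw [he]
        exact hgK
      · have he : P + 1 + (K - P - 1 + 1) = K + 1 := by omega
        rw [List.drop_drop, he]
        exact hdie s[K] hgK
      · intro j hj c hc
        rw [List.getElem?_drop] at hc
        exact hle (P + 1 + j) (by omega) c hc
  have h2 := run2 M (s.drop (P + 1)) [] List.not_mem_nil hJ
  rw [List.nil_append] at h2
  have hflen : ((s.drop (P + 1)).filter (fun c => c ≠ M)).length ≤ n := by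
    have hf := List.length_filter_le (fun c => decide (c ≠ M)) (s.drop (P + 1))
    have hd : (s.drop (P + 1)).length = s.length - (P + 1) := List.length_drop ..
    omega
  rw [h1, h2, List.reverse_append, ih _ hflen]
  rfl

lemma main_aux : ∀ (n : Nat) (s : List Char), s.length ≤ n → (runA s []).reverse = altGo s := by
  intro n
  induction n with
  | zero =>
    intro s hl
    have hs : s = [] := List.eq_nil_of_length_eq_zero (Nat.le_zero.mp hl)
    subst hs
    rw [altGo]
    rfl
  | succ n ih =>
    intro s hl
    cases s with
    | nil => rw [altGo]; rfl
    | cons c0 rest =>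
      rw [altGo_cons]
      have hstep : scanB (c0 :: rest) c0 0 0 =
          if c0 ∈ rest then scanB rest c0 0 1 else (c0, 0) := by
        simp only [scanB]
        rw [if_neg (lt_irrefl c0)]
      by_cases hmem : c0 ∈ rest
      · rw [hstep, if_pos hmem]
        obtain ⟨K, hPK, hK, hP, hlt, hle, hrec, hdie⟩ :=
          scan_spec rest [c0] c0 0 (by simp) (by simp)
            (fun j hj => absurd hj (Nat.not_lt_zero j))
            (by
              intro j hj c hc
              have hj0 : j = 0 := by simp at hj; omega
              subst hj0
              simp at hc
              exact le_of_eq hc)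
            (by
              intro j hj c hc
              have hj0 : j = 0 := by simp at hj; omega
              subst hj0
              simp at hc
              subst hc
              simpa using hmem)
        simp only [List.singleton_append, List.length_singleton] at hPK hK hP hlt hle hrec hdie
        exact assemble n ih (c0 :: rest) hl _ _ K hPK hK hP hlt hle hrec hdie
      · rw [hstep, if_neg hmem]
        refine assemble n ih (c0 :: rest) hl c0 0 0 (le_refl 0) (by simp) (by simp)
          (fun j hj => absurd hj (Nat.not_lt_zero j))
          ?_ (fun j hj => absurd hj (Nat.not_lt_zero j)) ?_
        · intro j hj c hc
          have hj0 : j = 0 := by omega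
          subst hj0
          simp at hc
          exact le_of_eq hc
        · intro c hc
          simp at hc
          subst hc
          simpa using hmem

-- ===== VERDICT (by name: the statement is the Claim_ definition above) =====
theorem removeDuplicateLetters_2_spec : Claim_equal_removeDuplicateLetters_2 := by
  intro s _
  unfold Spec_removeDuplicateLetters_2 removeDuplicateLetters_2 removeDuplicateLetters_2_alt
  have h := foldA s.toList (PySem.Dict.counter s.toList) PySem.Set.empty []
    (fun x => PySem.Dict.getD_counter ..) (by simp [PySem.Set.empty]) List.nodup_nil
  simp only [List.reverse_nil] at h
  rw [h, main_aux s.toList.length s.toList le_rfl]
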